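-- pv_equiv track=rewrite | github.com/BeomjinSouth/practiceD3 | pages/영어리스닝.py | merge_lines
-- ===== SOURCE A (Python) =====
-- def merge_lines(lines):
--     merged = []
--     current_sentence = ""
--     for line in lines:
--         line = line.strip()
--         if line.endswith('.') or line.endswith('?') or line.endswith('!'):
--             current_sentence += " " + line
--             merged.append(current_sentence.strip())
--             current_sentence = ""
--         else:
--             current_sentence += " " + line
--     if current_sentence:
--         merged.append(current_sentence.strip())
--     return merged
-- ===== SOURCE B (Python) =====
-- def merge_lines(lines):
--     stripped = [line.strip() for line in lines]
--
--     def go(xs):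
--         if not xs:
--             return []
--         for i, s in enumerate(xs):
--             if s.endswith(('.', '?', '!')):
--                 return [' '.join(xs[:i + 1]).strip()] + go(xs[i + 1:])
--         return [' '.join(xs).strip()]
--
--     return go(stripped)
-- ===== Notes on version B (the rewrite author's own statement) =====
-- stated objective: alternative
-- what changed: A streams over the lines once, accumulating the current sentence in a string that it flushes at terminal punctuation; B strips all lines first and then uses a divide-and-conquer recursion that repeatedly locates the FIRST terminator line, emits that whole prefix via one ' '.join(...).strip(), and recurses on the remaining suffix.
import Mathlib
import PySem

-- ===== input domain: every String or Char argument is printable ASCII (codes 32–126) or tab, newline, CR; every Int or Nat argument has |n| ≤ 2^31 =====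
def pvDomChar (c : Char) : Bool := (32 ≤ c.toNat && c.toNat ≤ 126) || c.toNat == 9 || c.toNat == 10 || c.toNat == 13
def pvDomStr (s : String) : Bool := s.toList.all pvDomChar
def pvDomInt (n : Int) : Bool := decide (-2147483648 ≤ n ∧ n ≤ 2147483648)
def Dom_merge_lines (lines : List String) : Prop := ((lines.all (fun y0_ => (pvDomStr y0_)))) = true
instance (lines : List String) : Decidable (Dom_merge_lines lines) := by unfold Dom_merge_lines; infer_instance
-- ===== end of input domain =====

-- B replaces A's streaming string accumulator by a divide-and-conquer recursion: strip all
-- lines, then repeatedly find the FIRST terminator line, emit that prefix joined, and recurse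
-- on the remainder (objective: alternative decomposition, same cost).

-- ===== PORT A =====
def merge_lines (lines : List String) : List String :=
  let st := lines.foldl (fun (st : List String × String) line =>
      let line := PySem.Str.strip line
      if PySem.Str.endswith line "." || PySem.Str.endswith line "?" || PySem.Str.endswith line "!" then
        (st.1 ++ [PySem.Str.strip (st.2 ++ " " ++ line)], "")
      else
        (st.1, st.2 ++ " " ++ line))
    ([], "")
  if st.2 ≠ "" then st.1 ++ [PySem.Str.strip st.2] else st.1

-- ===== PORT B =====
-- s.endswith(('.', '?', '!')) — Python's tuple endswith = disjunction of the three suffix tests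
def pvEndsPunct (s : String) : Bool :=
  PySem.Str.endswith s "." || PySem.Str.endswith s "?" || PySem.Str.endswith s "!"

-- ' '.join(xs).strip()
def pvEmit (g : List String) : String := PySem.Str.strip (PySem.Str.join " " g)

-- the inner recursive 'go': find the first terminator line (the enumerate loop = findIdx?),
-- emit the joined prefix through it, recurse on the rest; no terminator → one final join
def pvGo (xs : List String) : List String :=
  if _hxs : xs = [] then []
  else
    match h : xs.findIdx? pvEndsPunct with
    | some i => pvEmit (xs.take (i + 1)) :: pvGo (xs.drop (i + 1))
    | none => [pvEmit xs]
termination_by xs.length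
decreasing_by
  obtain ⟨hi, -⟩ := List.findIdx?_eq_some_iff_getElem.mp h
  simp only [List.length_drop]
  omega

def merge_lines_alt (lines : List String) : List String :=
  pvGo (lines.map PySem.Str.strip)

-- ===== PRECONDITION & SPEC =====
def Spec_merge_lines (lines : List String) (out : List String) : Prop := out = merge_lines_alt lines
instance (lines : List String) (out : List String) : Decidable (Spec_merge_lines lines out) := by unfold Spec_merge_lines; infer_instance

-- ===== CLAIM (what is proved, stated in full; the proofs are below) =====
def Claim_equal_merge_lines : Prop := ∀ (lines : List String), Dom_merge_lines lines → Spec_merge_lines lines (merge_lines lines)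

-- ===== LEMMAS AND PROOFS =====

-- A's accumulator after absorbing the stripped lines `seg`: " "+s1+" "+s2+…
def pvCat : List String → String
  | [] => ""
  | s :: rest => " " ++ s ++ pvCat rest

-- the segment-grouping fold step (proof device bridging the two ports)
def pvStep (st : List (List String) × List String) (s : String) : List (List String) × List String :=
  let seg := st.2 ++ [s]
  if pvEndsPunct s then (st.1 ++ [seg], []) else (st.1, seg)

-- grouping-fold form of the computation
def pvGroups (ss : List String) : List String :=
  let st := ss.foldl pvStep ([], [])
  (if st.2 ≠ [] then st.1 ++ [st.2] else st.1).map pvEmit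

theorem pvCat_toList (x : String) (seg : List String) :
    (pvCat (x :: seg)).toList = ' ' :: PySem.Chars.join [' '] ((x :: seg).map String.toList) := by
  induction seg generalizing x with
  | nil => simp [pvCat, PySem.Chars.join_singleton]
  | cons y ys ih =>
    simp only [pvCat, List.map_cons] at *
    rw [PySem.Chars.join_cons_cons]
    simp [ih y]

theorem pvStrip_space (cs : List Char) :
    PySem.Chars.strip (' ' :: cs) = PySem.Chars.strip cs := by
  simp [PySem.Chars.strip, PySem.Chars.lstrip,
    show PySem.Chars.isspace ' ' = true from rfl]

theorem pvCat_ne (x : String) (xs : List String) : pvCat (x :: xs) ≠ "" := by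
  intro h
  have := congrArg String.toList h
  rw [pvCat_toList] at this
  simp at this

theorem pvEmit_eq (seg : List String) (h : seg ≠ []) :
    PySem.Str.strip (pvCat seg) = pvEmit seg := by
  cases seg with
  | nil => exact absurd rfl h
  | cons x xs =>
    apply String.toList_inj.mp
    rw [PySem.Str.toList_strip, pvCat_toList, pvStrip_space, pvEmit,
      PySem.Str.toList_strip, PySem.Str.toList_join]
    simp

theorem pvCat_snoc (seg : List String) (s : String) :
    pvCat seg ++ " " ++ s = pvCat (seg ++ [s]) := by
  induction seg with
  | nil => simp [pvCat]
  | cons y ys ih =>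
    simp only [List.cons_append, pvCat]
    rw [← ih]
    simp [String.append_assoc]

-- A's fold simulates the segment-grouping fold
theorem pvLoop (lines : List String) (gs : List (List String)) (seg : List String) :
    lines.foldl (fun (st : List String × String) line =>
        let line := PySem.Str.strip line
        if PySem.Str.endswith line "." || PySem.Str.endswith line "?" || PySem.Str.endswith line "!" then
          (st.1 ++ [PySem.Str.strip (st.2 ++ " " ++ line)], "")
        else
          (st.1, st.2 ++ " " ++ line)) (gs.map pvEmit, pvCat seg)
    = (((lines.map PySem.Str.strip).foldl pvStep (gs, seg)).1.map pvEmit,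
       pvCat ((lines.map PySem.Str.strip).foldl pvStep (gs, seg)).2) := by
  induction lines generalizing gs seg with
  | nil => simp
  | cons line rest ih =>
    simp only [List.foldl_cons, List.map_cons, pvStep]
    by_cases h : pvEndsPunct (PySem.Str.strip line)
    · have hA : (PySem.Str.endswith (PySem.Str.strip line) "." ||
          PySem.Str.endswith (PySem.Str.strip line) "?" ||
          PySem.Str.endswith (PySem.Str.strip line) "!") = true := h
      simp only [hA, h, if_pos]
      have : pvCat seg ++ " " ++ PySem.Str.strip line = pvCat (seg ++ [PySem.Str.strip line]) :=
        pvCat_snoc _ _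
      rw [this, pvEmit_eq _ (by simp),
        show ("" : String) = pvCat [] from rfl,
        show gs.map pvEmit ++ [pvEmit (seg ++ [PySem.Str.strip line])]
           = (gs ++ [seg ++ [PySem.Str.strip line]]).map pvEmit by simp]
      exact ih _ _
    · have hA : (PySem.Str.endswith (PySem.Str.strip line) "." ||
          PySem.Str.endswith (PySem.Str.strip line) "?" ||
          PySem.Str.endswith (PySem.Str.strip line) "!") = false := by
        simpa [pvEndsPunct] using h
      simp only [hA, h, Bool.false_eq_true, if_false]
      rw [pvCat_snoc]
      exact ih _ _

-- A equals the grouping-fold form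
theorem pvA_eq_groups (lines : List String) : merge_lines lines = pvGroups (lines.map PySem.Str.strip) := by
  unfold merge_lines pvGroups
  have h := pvLoop lines [] []
  simp only [show (([], "") : List String × String) = (([] : List (List String)).map pvEmit, pvCat []) from rfl]
  rw [h]
  cases hseg : ((lines.map PySem.Str.strip).foldl pvStep ([], [])).2 with
  | nil => simp [pvCat]
  | cons x xs =>
    rw [if_pos (pvCat_ne x xs), if_pos (by simp)]
    simp [pvEmit_eq (x :: xs) (by simp)]

-- the grouping fold ignores a prefix of already-emitted groups
theorem pvShift (ss : List String) (gs g : List (List String)) (seg : List String) :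
    ss.foldl pvStep (gs ++ g, seg)
      = (gs ++ (ss.foldl pvStep (g, seg)).1, (ss.foldl pvStep (g, seg)).2) := by
  induction ss generalizing g seg with
  | nil => simp
  | cons s rest ih =>
    simp only [List.foldl_cons, pvStep]
    by_cases h : pvEndsPunct s
    · simp only [h, if_pos, List.append_assoc]
      exact ih (g ++ [seg ++ [s]]) []
    · simp only [h, Bool.false_eq_true, if_false]
      exact ih g (seg ++ [s])

-- over a terminator-free run the fold just extends the segment
theorem pvNoterm (pre : List String) (gs : List (List String)) (seg : List String)
    (h : ∀ s ∈ pre, pvEndsPunct s = false) :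
    pre.foldl pvStep (gs, seg) = (gs, seg ++ pre) := by
  induction pre generalizing seg with
  | nil => simp
  | cons s rest ih =>
    simp only [List.foldl_cons, pvStep, h s (by simp), Bool.false_eq_true, if_false]
    rw [ih _ (fun t ht => h t (by simp [ht]))]
    simp

-- the grouping-fold form equals B's first-terminator recursion
theorem pvGroups_eq_go (ss : List String) : pvGroups ss = pvGo ss := by
  induction hn : ss.length using Nat.strong_induction_on generalizing ss with
  | _ n ih =>
  cases hss : ss with
  | nil => subst hss; simp [pvGroups, pvGo]
  | cons a as =>
    subst hss
    rw [pvGo, dif_neg (by simp)]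
    cases hf : (a :: as).findIdx? pvEndsPunct with
    | none =>
      have hall : ∀ s ∈ a :: as, pvEndsPunct s = false := List.findIdx?_eq_none_iff.mp hf
      unfold pvGroups
      rw [pvNoterm _ _ _ hall]
      simp
    | some i =>
      obtain ⟨hi, hpi, hlt⟩ := List.findIdx?_eq_some_iff_getElem.mp hf
      have hsplit : (a :: as) = (a :: as).take (i + 1) ++ (a :: as).drop (i + 1) :=
        (List.take_append_drop _ _).symm
      have htake : (a :: as).take (i + 1) = (a :: as).take i ++ [(a :: as)[i]] := by
        rw [List.take_add_one]
        simp [List.getElem?_eq_getElem hi]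
      have hpre : ∀ s ∈ (a :: as).take i, pvEndsPunct s = false := by
        intro s hs
        obtain ⟨j, hj, rfl⟩ := List.mem_iff_getElem.mp hs
        have hj' : j < i := by
          have := hj; simp [List.length_take] at this; omega
        rw [List.getElem_take]
        simpa using hlt j hj'
      unfold pvGroups
      conv_lhs => rw [hsplit]
      rw [List.foldl_append, htake, List.foldl_append, pvNoterm _ _ _ hpre]
      simp only [List.foldl_cons, List.foldl_nil, pvStep, List.nil_append]
      rw [if_pos hpi,
        show ([(a :: as).take i ++ [(a :: as)[i]]] : List (List String))
           = [(a :: as).take i ++ [(a :: as)[i]]] ++ [] by simp,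
        pvShift]
      have hrec : pvGroups ((a :: as).drop (i + 1)) = pvGo ((a :: as).drop (i + 1)) := by
        apply ih ((a :: as).drop (i + 1)).length _ _ rfl
        simp only [List.length_drop, ← hn]
        omega
      unfold pvGroups at hrec
      rw [← htake]
      simp only [List.drop_succ_cons] at hrec ⊢
      cases h2 : ((as.drop i).foldl pvStep ([], [])).2 with
      | nil =>
        simp [h2] at hrec
        simp [hrec]
      | cons y ys =>
        simp [h2] at hrec
        simp [← hrec]

-- ===== VERDICT (by name: the statement is the Claim_ definition above) =====
theorem merge_lines_spec : Claim_equal_merge_lines := by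
  intro lines _
  unfold Spec_merge_lines merge_lines_alt
  rw [pvA_eq_groups, pvGroups_eq_go]
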